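-- pv_equiv track=rewrite | github.com/tractatus1889/hyperdata | data/grammars/tivari.py | has_valid_prefix
-- ===== SOURCE A (Python) =====
-- def has_valid_prefix(sentence: str) -> bool:
--     """Check if the sentence starts with a valid Tivari string."""
--     tokens = sentence.strip().split()
--
--     if len(tokens) < 3:
--         return False
--
--     if tokens[0] != "XAQ":
--         return False
--
--     for i in range(1, len(tokens)):
--         if tokens[i] == "BEK":
--             mid_tokens = tokens[1:i]
--             if len(mid_tokens) >= 1 and all(t == "ZIV" for t in mid_tokens):
--                 return True
--             return False
--         elif tokens[i] != "ZIV":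
--             return False
--
--     return False
-- ===== SOURCE B (Python) =====
-- def _ziv_then_bek(ts, seen_ziv):
--     """True iff ts begins with (more) ZIVs followed by BEK, requiring at least one preceding ZIV."""
--     if not ts:
--         return False
--     if ts[0] == "ZIV":
--         return _ziv_then_bek(ts[1:], True)
--     return seen_ziv and ts[0] == "BEK"
--
--
-- def has_valid_prefix(sentence: str) -> bool:
--     """Check if the sentence starts with a valid Tivari string."""
--     tokens = sentence.strip().split()
--     if not tokens or tokens[0] != "XAQ":
--         return False
--     return _ziv_then_bek(tokens[1:], False)
-- ===== Notes on version B (the rewrite author's own statement) =====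
-- stated objective: simpler
-- what changed: A's index loop with early returns that, on hitting BEK, re-slices and re-scans the mid tokens is replaced by a single structural recursion over the token tail carrying one boolean flag, so no slice or second scan exists.
import Mathlib
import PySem

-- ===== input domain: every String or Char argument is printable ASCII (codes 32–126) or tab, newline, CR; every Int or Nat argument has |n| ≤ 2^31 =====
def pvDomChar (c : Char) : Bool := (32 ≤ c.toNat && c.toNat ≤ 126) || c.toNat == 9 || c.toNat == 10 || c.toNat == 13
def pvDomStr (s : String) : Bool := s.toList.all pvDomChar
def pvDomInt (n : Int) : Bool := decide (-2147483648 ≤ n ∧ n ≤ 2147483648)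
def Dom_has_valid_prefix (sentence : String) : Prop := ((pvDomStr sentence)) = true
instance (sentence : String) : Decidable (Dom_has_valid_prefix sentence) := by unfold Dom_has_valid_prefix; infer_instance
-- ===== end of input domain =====

-- B replaces A's index loop with slicing and a re-computed mid-token scan by one
-- structural recursion over the token tail carrying one boolean flag; same cost class, simpler control flow.

-- ===== PORT A =====
-- the 'for i in range(1, len(tokens))' loop of A, with its early returns
def aLoop (tokens : List String) (i : Nat) : Bool :=
  if h : i < tokens.length then
    if tokens[i] = "BEK" then
      let mid := PySem.List.slice tokens (some 1) (some (i : Int))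
      decide (1 ≤ mid.length) && mid.all (fun t => t = "ZIV")
    else if tokens[i] ≠ "ZIV" then false
    else aLoop tokens (i + 1)
  else false
termination_by tokens.length - i

def has_valid_prefix (sentence : String) : Bool :=
  let tokens := PySem.Str.split₀ (PySem.Str.strip sentence)
  if tokens.length < 3 then false
  else if ¬ (PySem.List.pyGet? tokens 0 = some "XAQ") then false
  else aLoop tokens 1

-- ===== PORT B =====
-- _ziv_then_bek of Source B
def zivThenBek : List String → Bool → Bool
  | [], _ => false
  | t :: ts, seen => if t = "ZIV" then zivThenBek ts true else seen && decide (t = "BEK")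

def has_valid_prefix_alt (sentence : String) : Bool :=
  match PySem.Str.split₀ (PySem.Str.strip sentence) with
  | [] => false
  | t :: ts => if t ≠ "XAQ" then false else zivThenBek ts false

-- ===== PRECONDITION & SPEC =====
def Spec_has_valid_prefix (sentence : String) (out : Bool) : Prop := out = has_valid_prefix_alt sentence
instance (sentence : String) (out : Bool) : Decidable (Spec_has_valid_prefix sentence out) := by unfold Spec_has_valid_prefix; infer_instance

-- ===== CLAIM (what is proved, stated in full; the proofs are below) =====
def Claim_equal_has_valid_prefix : Prop := ∀ (sentence : String), Dom_has_valid_prefix sentence → Spec_has_valid_prefix sentence (has_valid_prefix sentence)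

-- ===== LEMMAS AND PROOFS =====

lemma zivThenBek_singleton (t : String) : zivThenBek [t] false = false := by
  simp [zivThenBek]

-- A's loop, entered at index 1 + |zs| of "x :: zs ++ rest" with zs all "ZIV",
-- equals B's recursion on rest with seen = (zs ≠ []).
lemma loop_eq (rest : List String) : ∀ (zs : List String) (x : String),
    (∀ z ∈ zs, z = "ZIV") →
    aLoop (x :: (zs ++ rest)) (1 + zs.length) = zivThenBek rest (decide (zs ≠ [])) := by
  induction rest with
  | nil =>
    intro zs x _
    unfold aLoop
    simp [zivThenBek]
  | cons t rs ih =>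
    intro zs x hzs
    have hlt : 1 + zs.length < (x :: (zs ++ t :: rs)).length := by
      simp; omega
    have hget : (x :: (zs ++ t :: rs))[1 + zs.length]'hlt = t := by
      have h1 : 1 + zs.length = zs.length + 1 := by omega
      simp [h1, List.getElem_append_right (Nat.le_refl zs.length)]
    unfold aLoop
    rw [dif_pos hlt, hget]
    by_cases hb : t = "BEK"
    · subst hb
      have hslice : PySem.List.slice (x :: (zs ++ "BEK" :: rs)) (some 1)
          (some ((1 + zs.length : Nat) : Int)) = zs := by
        have h1 : ((1:Int)) = ((1:Nat) : Int) := by norm_cast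
        have h2 : ((1 + zs.length : Nat) : Int) = ((1:Nat):Int) + ((zs.length : Nat) : Int) := by
          push_cast; ring
        rw [h1, h2, PySem.List.slice_natCast_add]
        simp
      rw [if_pos rfl]
      simp only [hslice, zivThenBek]
      have hZ : zs.all (fun t => decide (t = "ZIV")) = true := by
        simp [List.all_eq_true]; exact hzs
      rw [hZ]
      rcases zs with _ | ⟨z, zs'⟩ <;> simp
    · rw [if_neg hb]
      by_cases hz : t = "ZIV"
      · have hcond : ¬ (t ≠ "ZIV") := by simpa using hz
        rw [if_neg hcond]
        have hall : ∀ z ∈ zs ++ ["ZIV"], z = "ZIV" := by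
          intro z hm
          rcases List.mem_append.1 hm with h | h
          · exact hzs z h
          · simpa using h
        have h1 : x :: (zs ++ t :: rs) = x :: ((zs ++ ["ZIV"]) ++ rs) := by simp [hz]
        have h2 : 1 + zs.length + 1 = 1 + (zs ++ ["ZIV"]).length := by simp; omega
        rw [h1, h2, ih (zs ++ ["ZIV"]) x hall]
        simp [zivThenBek, hz]
      · simp [zivThenBek, hz, hb]

lemma body_eq (ws : List String) :
    (if ws.length < 3 then false
     else if ¬ (PySem.List.pyGet? ws 0 = some "XAQ") then false
     else aLoop ws 1)
    = (match ws with
       | [] => false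
       | t :: ts => if t ≠ "XAQ" then false else zivThenBek ts false) := by
  rcases ws with _ | ⟨x, ts⟩
  · simp
  · have hget : PySem.List.pyGet? (x :: ts) 0 = some x := by
      simp [pysem]
    by_cases hx : x = "XAQ"
    · subst hx
      simp only [hget]
      by_cases hlen : (("XAQ" :: ts) : List String).length < 3
      · rw [if_pos hlen]
        rcases ts with _ | ⟨t, ts'⟩
        · simp [zivThenBek]
        · rcases ts' with _ | ⟨u, ts''⟩
          · simp [zivThenBek_singleton]
          · simp at hlen; omega
      · rw [if_neg hlen]
        have := loop_eq ts [] "XAQ" (by simp)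
        simp only [List.nil_append, List.length_nil] at this
        simp [this]
    · rcases Nat.lt_or_ge ((x :: ts) : List String).length 3 with h | h
      · simp [hx]
      · rw [if_neg (by omega)]
        simp [hx]

-- ===== VERDICT (by name: the statement is the Claim_ definition above) =====
theorem has_valid_prefix_spec : Claim_equal_has_valid_prefix := by
  intro sentence _
  unfold Spec_has_valid_prefix has_valid_prefix has_valid_prefix_alt
  exact body_eq (PySem.Str.split₀ (PySem.Str.strip sentence))
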